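-- pv_equiv track=rewrite | github.com/isi-metaphor/lcc-service | legacy/extractor-2014-01.py | filterMappings
-- ===== SOURCE A (Python) =====
-- def filterMappings(BestArgs, mappings):
--     bestMapping = dict()
--     toremove = dict()
--
--     for predName in mappings:
--         for args in mappings[predName]:
--             included = False
--             for arg in args:
--                 if arg in BestArgs:
--                     included = True
--                     break
--             if included:
--                 if predName not in bestMapping:
--                     bestMapping[predName] = []
--                 bestMapping[predName].append(args)
--             else:
--                 if predName not in toremove:
--                     toremove[predName] = []
--                 toremove[predName].append(args)
--
--     for predName in toremove:
--         for args in toremove[predName]: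
--             included = False
--             for arg in args:
--                 for predName2 in bestMapping:
--                     for args2 in bestMapping[predName2]:
--                         if arg in args2:
--                             included = True
--                             break
--                     if included:
--                         break
--                 if included:
--                     break
--             if included:
--                 if predName not in bestMapping:
--                     bestMapping[predName] = []
--                 bestMapping[predName].append(args)
--
--     return bestMapping
-- ===== SOURCE B (Python) =====
-- def filterMappings(BestArgs, mappings):
--     best = set(BestArgs)
--     covered = set()   # every arg occurring in some kept args-list so far
--     kept = {}
--     dropped = []
--     for predName, argsLists in mappings.items():
--         for args in argsLists:
--             if any(a in best for a in args):
--                 kept.setdefault(predName, []).append(args)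
--                 covered.update(args)
--             else:
--                 dropped.append((predName, args))
--     for predName, args in dropped:
--         if any(a in covered for a in args):
--             kept.setdefault(predName, []).append(args)
--             covered.update(args)
--     return kept
-- ===== Notes on version B (the rewrite author's own statement) =====
-- stated objective: faster
-- what changed: A's re-add pass rescans every args-list of the whole best mapping for each arg of each dropped list; B maintains a running set of covered args (updated as lists are kept or re-added), so the second pass is one linear scan with O(1) membership tests.
import Mathlib
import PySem

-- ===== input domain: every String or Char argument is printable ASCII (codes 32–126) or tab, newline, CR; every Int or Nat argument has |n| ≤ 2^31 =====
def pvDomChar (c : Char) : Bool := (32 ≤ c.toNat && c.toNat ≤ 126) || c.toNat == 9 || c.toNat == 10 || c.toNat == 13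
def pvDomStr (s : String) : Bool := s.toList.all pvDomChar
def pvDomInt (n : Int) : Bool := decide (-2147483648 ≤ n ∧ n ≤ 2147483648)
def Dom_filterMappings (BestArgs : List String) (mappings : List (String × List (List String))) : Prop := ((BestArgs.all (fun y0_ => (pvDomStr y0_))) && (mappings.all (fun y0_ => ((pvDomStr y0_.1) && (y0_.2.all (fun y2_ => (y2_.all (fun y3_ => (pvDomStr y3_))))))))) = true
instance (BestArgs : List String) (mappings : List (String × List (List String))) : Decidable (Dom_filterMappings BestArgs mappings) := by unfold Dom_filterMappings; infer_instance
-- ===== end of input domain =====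

-- B replaces A's repeated rescans of the whole best mapping by one running set of covered
-- args, making the re-add pass a single linear scan (objective: faster).

-- ===== PORT A =====
-- 'if k not in d: d[k] = []' followed by 'd[k].append(v)'
def dictInitAppend (d : PySem.Dict String (List (List String))) (k : String) (v : List String) :
    PySem.Dict String (List (List String)) :=
  let d' := if d.contains k then d else d.insert k []
  d'.modify k [] (fun l => l ++ [v])

def filterMappings (BestArgs : List String) (mappings : List (String × List (List String))) :
    List (String × List (List String)) :=
  let p1 := mappings.foldl
    (fun (st : PySem.Dict String (List (List String)) × PySem.Dict String (List (List String))) pr =>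
      pr.2.foldl
        (fun st args =>
          let included := args.any (fun arg => BestArgs.contains arg)
          if included then (dictInitAppend st.1 pr.1 args, st.2)
          else (st.1, dictInitAppend st.2 pr.1 args))
        st)
    (PySem.Dict.empty, PySem.Dict.empty)
  let bm := p1.2.items.foldl
    (fun bm pr =>
      pr.2.foldl
        (fun bm args =>
          let included := args.any (fun arg =>
            bm.items.any (fun pr2 => pr2.2.any (fun args2 => args2.contains arg)))
          if included then dictInitAppend bm pr.1 args else bm)
        bm)
    p1.1
  bm.items

-- ===== PORT B =====
-- 'kept.setdefault(k, []).append(v)'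
def setdefaultAppend (d : PySem.Dict String (List (List String))) (k : String) (v : List String) :
    PySem.Dict String (List (List String)) :=
  d.modify k [] (fun l => l ++ [v])

def filterMappings_alt (BestArgs : List String) (mappings : List (String × List (List String))) :
    List (String × List (List String)) :=
  let best : PySem.Set String := PySem.Set.ofList BestArgs
  let st := mappings.foldl
    (fun (st : PySem.Dict String (List (List String)) × PySem.Set String × List (String × List String)) pr =>
      pr.2.foldl
        (fun st args =>
          if args.any (fun a => PySem.Set.contains best a) then
            (setdefaultAppend st.1 pr.1 args, PySem.Set.update st.2.1 args, st.2.2)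
          else
            (st.1, st.2.1, st.2.2 ++ [(pr.1, args)]))
        st)
    (PySem.Dict.empty, PySem.Set.empty, [])
  let fin := st.2.2.foldl
    (fun (st : PySem.Dict String (List (List String)) × PySem.Set String) pr =>
      if pr.2.any (fun a => PySem.Set.contains st.2 a) then
        (setdefaultAppend st.1 pr.1 pr.2, PySem.Set.update st.2 pr.2)
      else st)
    (st.1, st.2.1)
  fin.1.items

-- ===== PRECONDITION & SPEC =====
-- Pre_ excludes association lists with duplicate keys, which cannot arise from A's Python dict
-- argument (they are an artefact of the assoc-list encoding of dicts).
def Pre_filterMappings (BestArgs : List String) (mappings : List (String × List (List String))) : Prop :=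
  (mappings.map Prod.fst).Nodup
instance (BestArgs : List String) (mappings : List (String × List (List String))) : Decidable (Pre_filterMappings BestArgs mappings) := by unfold Pre_filterMappings; infer_instance

def pvWitness_filterMappings : List String × (List (String × List (List String))) :=
  (["a"], [("p", [["a", "b"]]), ("q", [["b", "c"]]), ("r", [["c"]])])

def Spec_filterMappings (BestArgs : List String) (mappings : List (String × List (List String))) (out : List (String × List (List String))) : Prop := out = filterMappings_alt BestArgs mappings
instance (BestArgs : List String) (mappings : List (String × List (List String))) (out : List (String × List (List String))) : Decidable (Spec_filterMappings BestArgs mappings out) := by unfold Spec_filterMappings; infer_instance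

-- ===== CLAIM (what is proved, stated in full; the proofs are below) =====
def Claim_equal_filterMappings : Prop := ∀ (BestArgs : List String) (mappings : List (String × List (List String))), Dom_filterMappings BestArgs mappings → Pre_filterMappings BestArgs mappings → Spec_filterMappings BestArgs mappings (filterMappings BestArgs mappings)

-- ===== LEMMAS AND PROOFS =====

-- the two append helpers agree
theorem initAppend_eq (d : PySem.Dict String (List (List String))) (k : String) (v : List String) :
    dictInitAppend d k v = setdefaultAppend d k v := by
  unfold dictInitAppend setdefaultAppend
  by_cases h : d.contains k = true
  · simp [h]
  · simp only [h, Bool.false_eq_true, if_false, PySem.Dict.modify]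
    rw [PySem.Dict.getD_insert_self, PySem.Dict.insert_insert_self,
        PySem.Dict.getD_of_not_contains _ _ (by simpa using h)]

-- 'arg in set(BestArgs)' is 'arg in BestArgs'
theorem ofList_contains (l : List String) (x : String) :
    PySem.Set.contains (PySem.Set.ofList l) x = l.contains x := by
  simp [PySem.Set.contains, List.contains_eq_mem, PySem.Set.mem_ofList]

-- a (possibly empty) trailing block of key k in a dict's item list
def pvBlk (k : String) (ws : List (List String)) : List (String × List (List String)) :=
  if ws = [] then [] else [(k, ws)]

-- flatten a grouped pair list
def pvFlat (L : List (String × List (List String))) : List (String × List String) :=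
  L.flatMap (fun pr => pr.2.map (fun l => (pr.1, l)))

-- what one setdefault-append does to the item list, when k occurs at most as the last key
theorem app_items (d : PySem.Dict String (List (List String))) (k : String) (v : List String)
    (base : List (String × List (List String))) (w : List (List String))
    (h : d.items = base ++ pvBlk k w) (hk : k ∉ base.map Prod.fst) :
    (setdefaultAppend d k v).items = base ++ [(k, w ++ [v])] := by
  obtain ⟨items⟩ := d
  subst h
  have hknot : ∀ p ∈ base, (p.1 == k) = false := by
    intro p hp
    by_contra hc
    exact hk (List.mem_map.mpr ⟨p, hp, by simpa using hc⟩)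
  by_cases hw : w = []
  · subst hw
    rw [show pvBlk k ([] : List (List String)) = [] from rfl, List.append_nil]
    have hc : (PySem.Dict.mk base : PySem.Dict String (List (List String))).contains k = false := by
      simp only [PySem.Dict.contains, List.any_eq_false]
      intro p hp
      simp [hknot p hp]
    simp [setdefaultAppend, PySem.Dict.modify, PySem.Dict.getD_of_not_contains _ _ hc,
      PySem.Dict.items_insert_of_not_contains _ _ hc]
  · have hblk : pvBlk k w = [(k, w)] := by simp [pvBlk, hw]
    rw [hblk] at *
    have hc : (PySem.Dict.mk (base ++ [(k, w)]) : PySem.Dict String (List (List String))).contains k = true := by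
      simp [PySem.Dict.contains]
    have hget : (PySem.Dict.mk (base ++ [(k, w)]) : PySem.Dict String (List (List String))).get? k = some w := by
      simp only [PySem.Dict.get?, List.find?_append]
      rw [List.find?_eq_none.mpr (fun p hp => by simp [hknot p hp])]
      simp
    have hgetD : (PySem.Dict.mk (base ++ [(k, w)]) : PySem.Dict String (List (List String))).getD k [] = w := by
      simp [PySem.Dict.getD, hget]
    have hbase : base.map (fun p => if (p.1 == k) = true then (k, w ++ [v]) else p) = base := by
      conv_rhs => rw [← List.map_id base]
      exact List.map_congr_left (fun p hp => by simp [hknot p hp])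
    simp only [setdefaultAppend, PySem.Dict.modify, hgetD,
      PySem.Dict.items_insert_of_contains _ _ hc, List.map_append]
    rw [hbase]
    simp

-- appending a whole block of values under one fresh-or-last key
theorem appFold_block (k : String) : ∀ (ws : List (List String))
    (d : PySem.Dict String (List (List String))) (base : List (String × List (List String)))
    (w : List (List String)), d.items = base ++ pvBlk k w → k ∉ base.map Prod.fst →
    ((ws.foldl (fun d l => setdefaultAppend d k l) d)).items = base ++ pvBlk k (w ++ ws) := by
  intro ws
  induction ws with
  | nil => intro d base w h hk; simpa using h
  | cons l ws ih =>
    intro d base w h hk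
    rw [List.foldl_cons]
    have h' : (setdefaultAppend d k l).items = base ++ pvBlk k (w ++ [l]) := by
      rw [app_items d k l base w h hk]
      simp [pvBlk]
    rw [ih (setdefaultAppend d k l) base (w ++ [l]) h' hk]
    simp

-- A's pass 1 splits into an append-fold on the included lists and one on the dropped lists
theorem splitA_inner (q : List String → Bool) (k : String) :
    ∀ (ls : List (List String)) (d₁ d₂ : PySem.Dict String (List (List String))),
    ls.foldl
      (fun (st : PySem.Dict String (List (List String)) × PySem.Dict String (List (List String))) args =>
        if q args then (setdefaultAppend st.1 k args, st.2)
        else (st.1, setdefaultAppend st.2 k args))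
      (d₁, d₂)
    = ((ls.filter q).foldl (fun d l => setdefaultAppend d k l) d₁,
       (ls.filter (fun l => !q l)).foldl (fun d l => setdefaultAppend d k l) d₂) := by
  intro ls
  induction ls with
  | nil => intro d₁ d₂; rfl
  | cons l ls ih =>
    intro d₁ d₂
    by_cases h : q l <;> simp [h, ih]

theorem splitA (BestArgs : List String) :
    ∀ (M : List (String × List (List String)))
      (d₁ d₂ : PySem.Dict String (List (List String))),
    M.foldl
      (fun (st : PySem.Dict String (List (List String)) × PySem.Dict String (List (List String))) pr =>
        pr.2.foldl
          (fun st args =>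
            if args.any (fun arg => BestArgs.contains arg) then (setdefaultAppend st.1 pr.1 args, st.2)
            else (st.1, setdefaultAppend st.2 pr.1 args))
          st)
      (d₁, d₂)
    = (M.foldl (fun d pr => (pr.2.filter (fun args => args.any (fun arg => BestArgs.contains arg))).foldl (fun d l => setdefaultAppend d pr.1 l) d) d₁,
       M.foldl (fun d pr => (pr.2.filter (fun args => !args.any (fun arg => BestArgs.contains arg))).foldl (fun d l => setdefaultAppend d pr.1 l) d) d₂) := by
  intro M
  induction M with
  | nil => intro d₁ d₂; rfl
  | cons pr M ih =>
    intro d₁ d₂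
    rw [List.foldl_cons, List.foldl_cons, List.foldl_cons,
        splitA_inner (fun args => args.any (fun arg => BestArgs.contains arg)) pr.1, ih]

-- B's pass 1 splits into the same kept fold, a covered-set fold, and the dropped pair list
theorem splitB_inner (q : List String → Bool) (k : String) :
    ∀ (ls : List (List String)) (d : PySem.Dict String (List (List String)))
      (c : PySem.Set String) (r : List (String × List String)),
    ls.foldl
      (fun (st : PySem.Dict String (List (List String)) × PySem.Set String × List (String × List String)) args =>
        if q args then (setdefaultAppend st.1 k args, PySem.Set.update st.2.1 args, st.2.2)
        else (st.1, st.2.1, st.2.2 ++ [(k, args)]))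
      (d, c, r)
    = ((ls.filter q).foldl (fun d l => setdefaultAppend d k l) d,
       (ls.filter q).foldl (fun c l => PySem.Set.update c l) c,
       r ++ (ls.filter (fun l => !q l)).map (fun l => (k, l))) := by
  intro ls
  induction ls with
  | nil => intro d c r; simp
  | cons l ls ih =>
    intro d c r
    by_cases h : q l <;> simp [h, ih]

theorem splitB (BestArgs : List String) :
    ∀ (M : List (String × List (List String)))
      (d : PySem.Dict String (List (List String))) (c : PySem.Set String)
      (r : List (String × List String)),
    M.foldl
      (fun (st : PySem.Dict String (List (List String)) × PySem.Set String × List (String × List String)) pr =>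
        pr.2.foldl
          (fun st args =>
            if args.any (fun a => BestArgs.contains a) then (setdefaultAppend st.1 pr.1 args, PySem.Set.update st.2.1 args, st.2.2)
            else (st.1, st.2.1, st.2.2 ++ [(pr.1, args)]))
          st)
      (d, c, r)
    = (M.foldl (fun d pr => (pr.2.filter (fun args => args.any (fun a => BestArgs.contains a))).foldl (fun d l => setdefaultAppend d pr.1 l) d) d,
       M.foldl (fun c pr => (pr.2.filter (fun args => args.any (fun a => BestArgs.contains a))).foldl (fun c l => PySem.Set.update c l) c) c,
       r ++ M.flatMap (fun pr => (pr.2.filter (fun args => !args.any (fun a => BestArgs.contains a))).map (fun l => (pr.1, l)))) := by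
  intro M
  induction M with
  | nil => intro d c r; simp
  | cons pr M ih =>
    intro d c r
    rw [List.foldl_cons, List.foldl_cons, List.foldl_cons,
        splitB_inner (fun args => args.any (fun a => BestArgs.contains a)) pr.1, ih]
    simp

-- the item list of the dropped-lists dict, in grouped form
theorem trF_items (q : List String → Bool) :
    ∀ (M : List (String × List (List String))) (d : PySem.Dict String (List (List String))),
    (M.map Prod.fst).Nodup → (∀ k ∈ M.map Prod.fst, k ∉ d.items.map Prod.fst) →
    (M.foldl (fun d pr => (pr.2.filter q).foldl (fun d l => setdefaultAppend d pr.1 l) d) d).items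
      = d.items ++ M.flatMap (fun pr => pvBlk pr.1 (pr.2.filter q)) := by
  intro M
  induction M with
  | nil => intro d _ _; simp
  | cons pr M ih =>
    intro d hnd hfresh
    rw [List.foldl_cons]
    have hk1 : pr.1 ∉ d.items.map Prod.fst := hfresh pr.1 (by simp)
    have hd' : ((pr.2.filter q).foldl (fun d l => setdefaultAppend d pr.1 l) d).items
        = d.items ++ pvBlk pr.1 (pr.2.filter q) :=
      appFold_block pr.1 (pr.2.filter q) d d.items [] (by simp [pvBlk]) hk1
    rw [ih _ (by simpa using hnd.of_cons) ?_]
    · rw [hd']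
      simp [List.append_assoc]
    · intro k hkM
      rw [hd', List.map_append]
      have hne : k ≠ pr.1 := by
        rintro rfl
        exact (List.nodup_cons.mp (by simpa using hnd)).1 hkM
      simp only [List.mem_append]
      rintro (hin | hin)
      · exact hfresh k (by simp [hkM]) hin
      · rcases List.mem_map.mp hin with ⟨p, hp, hfst⟩
        unfold pvBlk at hp
        split at hp
        · simp at hp
        · simp only [List.mem_singleton] at hp
          subst hp
          exact hne hfst.symm

-- flattening the grouped item list recovers the dropped pair list
theorem flat_blk (q : List String → Bool) :
    ∀ (M : List (String × List (List String))),
    pvFlat (M.flatMap (fun pr => pvBlk pr.1 (pr.2.filter q)))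
      = M.flatMap (fun pr => (pr.2.filter q).map (fun l => (pr.1, l))) := by
  intro M
  induction M with
  | nil => rfl
  | cons pr M ih =>
    simp only [List.flatMap_cons]
    unfold pvFlat at *
    rw [List.flatMap_append, ih]
    congr 1
    unfold pvBlk
    split
    · simp [*]
    · simp

-- the membership scan A's pass 2 performs over the whole best mapping
def pvScan (bm : PySem.Dict String (List (List String))) (a : String) : Bool :=
  bm.items.any (fun pr2 => pr2.2.any (fun args2 => args2.contains a))

theorem pvScan_def (bm : PySem.Dict String (List (List String))) (a : String) :
    bm.items.any (fun pr2 => pr2.2.any (fun args2 => args2.contains a)) = pvScan bm a := rfl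

-- A's nested pass 2 is the flat fold over the flattened item list
theorem flatten2_inner (k : String) :
    ∀ (ls : List (List String)) (bm : PySem.Dict String (List (List String))),
    ls.foldl
      (fun bm args =>
        if args.any (fun arg => pvScan bm arg) then setdefaultAppend bm k args else bm)
      bm
    = (ls.map (fun l => (k, l))).foldl
        (fun bm kl =>
          if kl.2.any (fun arg => pvScan bm arg) then setdefaultAppend bm kl.1 kl.2 else bm)
        bm := by
  intro ls
  induction ls with
  | nil => intro bm; rfl
  | cons l ls ih => intro bm; simp only [List.foldl_cons, List.map_cons]; rw [ih]

theorem flatten2 :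
    ∀ (L : List (String × List (List String))) (bm : PySem.Dict String (List (List String))),
    L.foldl
      (fun bm pr =>
        pr.2.foldl
          (fun bm args =>
            if args.any (fun arg => pvScan bm arg) then setdefaultAppend bm pr.1 args else bm)
          bm)
      bm
    = (pvFlat L).foldl
        (fun bm kl =>
          if kl.2.any (fun arg => pvScan bm arg) then setdefaultAppend bm kl.1 kl.2 else bm)
        bm := by
  intro L
  induction L with
  | nil => intro bm; rfl
  | cons pr L ih =>
    intro bm
    simp only [List.foldl_cons, pvFlat, List.flatMap_cons, List.foldl_append]
    rw [flatten2_inner pr.1, ih]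
    rfl

theorem nodup_app (d : PySem.Dict String (List (List String))) (k : String) (v : List String)
    (h : d.keys.Nodup) : (setdefaultAppend d k v).keys.Nodup := by
  unfold setdefaultAppend PySem.Dict.modify
  exact PySem.Dict.nodup_keys_insert d k _ h

-- appending an args-list adds exactly its args to what the scan can find
theorem scan_app (d : PySem.Dict String (List (List String))) (hnd : d.keys.Nodup)
    (k : String) (v : List String) (a : String) :
    pvScan (setdefaultAppend d k v) a = (pvScan d a || v.contains a) := by
  by_cases hc : d.contains k = true
  · obtain ⟨p, hp, hpk⟩ := List.any_eq_true.mp (show d.items.any (fun p => p.1 == k) = true from hc)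
    have hpk' : p.1 = k := by simpa using hpk
    obtain ⟨l1, l2, hsplit⟩ := List.append_of_mem hp
    have hkeys : ((l1 ++ p :: l2).map Prod.fst).Nodup := by
      have : d.keys = d.items.map Prod.fst := by
        simp [PySem.Dict.keys]
      rw [this, hsplit] at hnd
      exact hnd
    have hkeys' := hkeys
    simp only [List.map_append, List.map_cons, hpk', List.nodup_append, List.nodup_cons] at hkeys'
    have hnotin1 : k ∉ l1.map Prod.fst := by
      intro hin
      have hcontra := hkeys'.2.2 k hin
      simp at hcontra
    have hnotin2 : k ∉ l2.map Prod.fst := hkeys'.2.1.1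
    have hk1 : ∀ p' ∈ l1, (p'.1 == k) = false := by
      intro p' hp'
      by_contra hb
      exact hnotin1 (List.mem_map.mpr ⟨p', hp', by simpa using hb⟩)
    have hk2 : ∀ p' ∈ l2, (p'.1 == k) = false := by
      intro p' hp'
      by_contra hb
      exact hnotin2 (List.mem_map.mpr ⟨p', hp', by simpa using hb⟩)
    have hget : d.getD k [] = p.2 := by
      unfold PySem.Dict.getD PySem.Dict.get?
      rw [hsplit, List.find?_append, List.find?_eq_none.mpr (fun p' hp' => by simp [hk1 p' hp'])]
      simp [hpk]
    have hitems : (setdefaultAppend d k v).items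
        = l1 ++ (k, p.2 ++ [v]) :: l2 := by
      unfold setdefaultAppend PySem.Dict.modify
      rw [hget, PySem.Dict.items_insert_of_contains _ _ hc, hsplit]
      simp only [List.map_append, List.map_cons, hpk, if_pos]
      rw [show l1.map (fun p' => if (p'.1 == k) = true then (k, p.2 ++ [v]) else p') = l1 by
            conv_rhs => rw [← List.map_id l1]
            exact List.map_congr_left (fun p' hp' => by simp [hk1 p' hp']),
          show l2.map (fun p' => if (p'.1 == k) = true then (k, p.2 ++ [v]) else p') = l2 by
            conv_rhs => rw [← List.map_id l2]
            exact List.map_congr_left (fun p' hp' => by simp [hk2 p' hp'])]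
    unfold pvScan
    rw [hitems, hsplit]
    simp only [List.any_append, List.any_cons]
    cases h1 : l1.any (fun pr2 => pr2.2.any (fun args2 => args2.contains a)) <;>
      cases h2 : l2.any (fun pr2 => pr2.2.any (fun args2 => args2.contains a)) <;>
      cases h3 : p.2.any (fun args2 => args2.contains a) <;>
      cases h4 : v.contains a <;> simp
  · have hc' : d.contains k = false := by simpa using hc
    have hitems : (setdefaultAppend d k v).items = d.items ++ [(k, [v])] := by
      unfold setdefaultAppend PySem.Dict.modify
      rw [PySem.Dict.getD_of_not_contains _ _ hc', PySem.Dict.items_insert_of_not_contains _ _ hc']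
      simp
    unfold pvScan
    rw [hitems]
    simp [List.any_append]

theorem mem_update (c : PySem.Set String) (l : List String) (a : String) :
    a ∈ PySem.Set.update c l ↔ a ∈ c ∨ a ∈ l := by
  induction l generalizing c with
  | nil => simp [PySem.Set.update]
  | cons x l ih =>
    unfold PySem.Set.update at *
    rw [List.foldl_cons, ih]
    rw [PySem.Set.mem_add]
    simp only [List.mem_cons]
    tauto

theorem contains_update (c : PySem.Set String) (l : List String) (a : String) :
    PySem.Set.contains (PySem.Set.update c l) a = (PySem.Set.contains c a || l.contains a) := by
  simp only [PySem.Set.contains, List.contains_eq_mem]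
  rw [show (decide (a ∈ c) || decide (a ∈ l)) = decide (a ∈ c ∨ a ∈ l) by
        by_cases h1 : a ∈ c <;> by_cases h2 : a ∈ l <;> simp [h1, h2]]
  simp [mem_update c l a]

theorem scan_inv_inner (k : String) :
    ∀ (ls : List (List String)) (c : PySem.Set String)
      (d : PySem.Dict String (List (List String))),
    d.keys.Nodup → (∀ a, PySem.Set.contains c a = pvScan d a) →
    (ls.foldl (fun d l => setdefaultAppend d k l) d).keys.Nodup
    ∧ ∀ a, PySem.Set.contains (ls.foldl (fun c l => PySem.Set.update c l) c) a
        = pvScan (ls.foldl (fun d l => setdefaultAppend d k l) d) a := by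
  intro ls
  induction ls with
  | nil => intro c d hnd hinv; exact ⟨hnd, hinv⟩
  | cons l ls ih =>
    intro c d hnd hinv
    rw [List.foldl_cons, List.foldl_cons]
    refine ih (PySem.Set.update c l) (setdefaultAppend d k l) (nodup_app d k l hnd) ?_
    intro a
    rw [contains_update, hinv a, scan_app d hnd k l a]

-- after pass 1 the covered set is exactly what the scan over the kept dict finds
theorem scan_inv (q : List String → Bool) :
    ∀ (M : List (String × List (List String))) (c : PySem.Set String)
      (d : PySem.Dict String (List (List String))),
    d.keys.Nodup → (∀ a, PySem.Set.contains c a = pvScan d a) →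
    (M.foldl (fun d pr => (pr.2.filter q).foldl (fun d l => setdefaultAppend d pr.1 l) d) d).keys.Nodup
    ∧ ∀ a, PySem.Set.contains
        (M.foldl (fun c pr => (pr.2.filter q).foldl (fun c l => PySem.Set.update c l) c) c) a
      = pvScan (M.foldl (fun d pr => (pr.2.filter q).foldl (fun d l => setdefaultAppend d pr.1 l) d) d) a := by
  intro M
  induction M with
  | nil => intro c d hnd hinv; exact ⟨hnd, hinv⟩
  | cons pr M ih =>
    intro c d hnd hinv
    simp only [List.foldl_cons]
    obtain ⟨hnd', hinv'⟩ := scan_inv_inner pr.1 (pr.2.filter q) c d hnd hinv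
    exact ih _ _ hnd' hinv'

-- pass 2: the scan test and the covered-set test take the two programs in lockstep
theorem sim2 :
    ∀ (R : List (String × List String)) (bm : PySem.Dict String (List (List String)))
      (cov : PySem.Set String),
    bm.keys.Nodup → (∀ a, PySem.Set.contains cov a = pvScan bm a) →
    R.foldl
      (fun bm kl =>
        if kl.2.any (fun arg => pvScan bm arg) then setdefaultAppend bm kl.1 kl.2 else bm)
      bm
    = (R.foldl
        (fun (st : PySem.Dict String (List (List String)) × PySem.Set String) kl =>
          if kl.2.any (fun a => PySem.Set.contains st.2 a) then
            (setdefaultAppend st.1 kl.1 kl.2, PySem.Set.update st.2 kl.2)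
          else st)
        (bm, cov)).1 := by
  intro R
  induction R with
  | nil => intro bm cov _ _; rfl
  | cons kl R ih =>
    intro bm cov hnd hinv
    rw [List.foldl_cons, List.foldl_cons]
    have htest : (kl.2.any fun a => PySem.Set.contains cov a) = (kl.2.any fun arg => pvScan bm arg) := by
      congr 1
      exact funext hinv
    rw [htest]
    by_cases h : (kl.2.any fun arg => pvScan bm arg) = true
    · rw [if_pos h, if_pos h]
      refine ih _ _ (nodup_app bm kl.1 kl.2 hnd) ?_
      intro a
      rw [contains_update, hinv a, scan_app bm hnd kl.1 kl.2 a]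
    · rw [if_neg h, if_neg h]
      exact ih _ _ hnd hinv

-- ===== VERDICT (by name: the statement is the Claim_ definition above) =====
theorem filterMappings_spec : Claim_equal_filterMappings := by
  intro BestArgs mappings _hdom hpre
  unfold Pre_filterMappings at hpre
  unfold Spec_filterMappings
  simp only [filterMappings, filterMappings_alt, ofList_contains, initAppend_eq, pvScan_def]
  rw [splitA BestArgs mappings PySem.Dict.empty PySem.Dict.empty,
      splitB BestArgs mappings PySem.Dict.empty PySem.Set.empty []]
  dsimp only
  rw [List.nil_append]
  rw [flatten2]
  rw [trF_items (fun args => !args.any (fun arg => BestArgs.contains arg)) mappings PySem.Dict.empty hpre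
        (by intro k _; simp [PySem.Dict.empty])]
  rw [show (PySem.Dict.empty : PySem.Dict String (List (List String))).items = [] from rfl,
      List.nil_append, flat_blk]
  obtain ⟨hnod, hinv⟩ := scan_inv (fun args => args.any (fun arg => BestArgs.contains arg)) mappings
      PySem.Set.empty PySem.Dict.empty (by simp [PySem.Dict.empty, PySem.Dict.keys]) (fun a => rfl)
  rw [sim2 _ _ _ hnod hinv]
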